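-- pv_equiv track=rewrite | github.com/healthonrails/annolid | annolid/utils/prompts.py | extract_number_and_remove_digits
-- ===== SOURCE A (Python) =====
-- def extract_number_and_remove_digits(input_string):
--     # Initialize variables to store the number and the result without digits
--     extracted_number = 0
--     result_without_digits = ""
--
--     # Iterate through each character in the input string
--     for char in input_string:
--         # Check if the character is a digit
--         if char.isdigit():
--             # If it's a digit, add it to the extracted number
--             extracted_number = extracted_number * 10 + int(char)
--         else:
--             # If it's not a digit, add it to the result string without digits
--             result_without_digits += char
--
--     return extracted_number, result_without_digits
-- ===== SOURCE B (Python) =====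
-- def extract_number_and_remove_digits(input_string):
--     digits = ''.join(c for c in input_string if c.isdigit())
--     result_without_digits = ''.join(c for c in input_string if not c.isdigit())
--     extracted_number = int(digits) if digits else 0
--     return extracted_number, result_without_digits
-- ===== Notes on version B (the rewrite author's own statement) =====
-- stated objective: simpler
-- what changed: Replaces the single loop with arithmetic digit accumulation and string concatenation by two independent filtering passes plus one int() parse of the collected digit characters.
import Mathlib
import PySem

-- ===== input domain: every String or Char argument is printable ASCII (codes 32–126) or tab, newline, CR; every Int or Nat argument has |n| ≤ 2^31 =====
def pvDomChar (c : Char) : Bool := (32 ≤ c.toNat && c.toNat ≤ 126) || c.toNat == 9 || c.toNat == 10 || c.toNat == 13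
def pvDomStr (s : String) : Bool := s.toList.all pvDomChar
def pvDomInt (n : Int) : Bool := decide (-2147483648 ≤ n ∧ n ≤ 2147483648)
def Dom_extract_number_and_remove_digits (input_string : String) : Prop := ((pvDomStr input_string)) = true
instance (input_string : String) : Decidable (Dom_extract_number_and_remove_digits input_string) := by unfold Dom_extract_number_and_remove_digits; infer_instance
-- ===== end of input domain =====

-- B replaces A's single accumulating loop by two independent filter passes plus one
-- parse of the collected digit characters (objective: simpler decomposition).


-- ===== PORT A =====
-- int(char) on a single ASCII digit char (the only case reached within Dom, where
-- isdigit c = true means '0' ≤ c ≤ '9') is exactly its digit value; ported by hand: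
def pvDigitVal (c : Char) : Int := (c.toNat : Int) - 48

def extract_number_and_remove_digits (input_string : String) : Int × String :=
  -- state: (extracted_number, result_without_digits); one pass over the characters
  let r := input_string.toList.foldl
    (fun (st : Int × List Char) char =>
      if PySem.Chars.isdigit char then (st.1 * 10 + pvDigitVal char, st.2)
      else (st.1, st.2 ++ [char]))
    (0, [])
  (r.1, String.ofList r.2)

-- ===== PORT B =====
-- int(digits) where digits is a nonempty string of ASCII digit chars (guaranteed by
-- the filter and the emptiness guard) is exact as this left fold; ported by hand:
def pvParseDigits (ds : List Char) : Int := ds.foldl (fun n c => n * 10 + pvDigitVal c) 0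

def extract_number_and_remove_digits_alt (input_string : String) : Int × String :=
  let digits := input_string.toList.filter (fun c => PySem.Chars.isdigit c)
  let result_without_digits := input_string.toList.filter (fun c => !PySem.Chars.isdigit c)
  let extracted_number := if digits.isEmpty then 0 else pvParseDigits digits
  (extracted_number, String.ofList result_without_digits)

-- ===== PRECONDITION & SPEC =====
def Spec_extract_number_and_remove_digits (input_string : String) (out : Int × String) : Prop := out = extract_number_and_remove_digits_alt input_string
instance (input_string : String) (out : Int × String) : Decidable (Spec_extract_number_and_remove_digits input_string out) := by unfold Spec_extract_number_and_remove_digits; infer_instance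

-- ===== CLAIM (what is proved, stated in full; the proofs are below) =====
def Claim_equal_extract_number_and_remove_digits : Prop := ∀ (input_string : String), Dom_extract_number_and_remove_digits input_string → Spec_extract_number_and_remove_digits input_string (extract_number_and_remove_digits input_string)

-- ===== LEMMAS AND PROOFS =====

theorem pv_fold_split (cs : List Char) (n : Int) (acc : List Char) :
    cs.foldl (fun (st : Int × List Char) char =>
      if PySem.Chars.isdigit char then (st.1 * 10 + pvDigitVal char, st.2)
      else (st.1, st.2 ++ [char])) (n, acc)
    = ((cs.filter (fun c => PySem.Chars.isdigit c)).foldl (fun m c => m * 10 + pvDigitVal c) n,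
       acc ++ cs.filter (fun c => !PySem.Chars.isdigit c)) := by
  induction cs generalizing n acc with
  | nil => simp
  | cons c cs ih =>
    by_cases h : PySem.Chars.isdigit c = true <;>
      simp [List.foldl_cons, h, ih, List.append_assoc]

-- ===== VERDICT (by name: the statement is the Claim_ definition above) =====
theorem extract_number_and_remove_digits_spec : Claim_equal_extract_number_and_remove_digits := by
  intro s _
  unfold Spec_extract_number_and_remove_digits extract_number_and_remove_digits
    extract_number_and_remove_digits_alt
  simp only [pv_fold_split, List.nil_append]
  rcases h : s.toList.filter (fun c => PySem.Chars.isdigit c) with _ | _ <;>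
    simp [pvParseDigits]
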